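-- pv_equiv track=rewrite | github.com/myt-yama/mtsBattler | src/models/summon.py | _judge_attribute
-- ===== SOURCE A (Python) =====
-- def _judge_attribute(bushu_codes):
--     """
--     属性判定ロジック
--
--     Parameters
--     ----------
--     bushu_codes : list[int,int,...]
--         部首コードのリスト
--
--     Returns
--     ----------
--     int
--         属性コード
--     """
--     # TODO:redisから取得する
--     fire  = { i*3 for i in range(70) }
--     water = { i*7 for i in range(30) }
--     grass = { i*5 for i in range(42) }
--
--     ret = []
--     if len(bushu_codes)>0:
--         bushu_codes_set = set(bushu_codes)
--         if len(fire & bushu_codes_set) > 0: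
--             ret.append('1')
--         if len(water & bushu_codes_set) > 0:
--             ret.append('2')
--         if len(grass & bushu_codes_set) > 0:
--             ret.append('3')
--     if len(ret) == 0:
--         ret.append('3')
--
--     return ",".join(ret)
-- ===== SOURCE B (Python) =====
-- def _judge_attribute(bushu_codes):
--     hit_f = hit_w = hit_g = False
--     for c in bushu_codes:
--         hit_f = hit_f or (0 <= c <= 207 and c % 3 == 0)
--         hit_w = hit_w or (0 <= c <= 203 and c % 7 == 0)
--         hit_g = hit_g or (0 <= c <= 205 and c % 5 == 0)
--     ret = []
--     if hit_f:
--         ret.append('1')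
--     if hit_w:
--         ret.append('2')
--     if hit_g:
--         ret.append('3')
--     if not ret:
--         ret.append('3')
--     return ",".join(ret)
-- ===== Notes on version B (the rewrite author's own statement) =====
-- stated objective: simpler
-- what changed: Replaces the three materialised multiple-sets and set intersections with one pass over bushu_codes computing three booleans via bound-and-divisibility tests (0<=c<=207 and c%3==0, etc.).
import Mathlib
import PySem

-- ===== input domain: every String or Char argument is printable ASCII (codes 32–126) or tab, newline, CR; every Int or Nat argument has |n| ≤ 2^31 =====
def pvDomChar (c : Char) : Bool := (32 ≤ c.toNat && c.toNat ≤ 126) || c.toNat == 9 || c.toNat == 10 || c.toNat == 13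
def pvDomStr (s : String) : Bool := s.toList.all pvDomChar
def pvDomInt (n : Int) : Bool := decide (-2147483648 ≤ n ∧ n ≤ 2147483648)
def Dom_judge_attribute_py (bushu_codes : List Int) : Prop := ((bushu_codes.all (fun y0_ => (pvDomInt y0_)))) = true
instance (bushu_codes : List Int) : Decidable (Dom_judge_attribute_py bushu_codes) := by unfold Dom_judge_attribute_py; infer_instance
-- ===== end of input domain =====

-- B replaces the three materialised multiple-sets and set intersections with one
-- pass computing three booleans by bound-and-divisibility tests (simpler).

-- ===== PORT A =====
-- set comprehensions { i*k for i in range(n) }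
def judge_attribute_py (bushu_codes : List Int) : String :=
  let fire  : PySem.Set Int := PySem.Set.ofList ((PySem.List.pyRange 0 70 1).map (fun i => i * 3))
  let water : PySem.Set Int := PySem.Set.ofList ((PySem.List.pyRange 0 30 1).map (fun i => i * 7))
  let grass : PySem.Set Int := PySem.Set.ofList ((PySem.List.pyRange 0 42 1).map (fun i => i * 5))
  let ret : List String := []
  let ret :=
    if PySem.List.len bushu_codes > 0 then
      let bushu_codes_set : PySem.Set Int := PySem.Set.ofList bushu_codes
      let ret := if PySem.Set.len (PySem.Set.inter fire bushu_codes_set) > 0 then ret ++ ["1"] else ret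
      let ret := if PySem.Set.len (PySem.Set.inter water bushu_codes_set) > 0 then ret ++ ["2"] else ret
      let ret := if PySem.Set.len (PySem.Set.inter grass bushu_codes_set) > 0 then ret ++ ["3"] else ret
      ret
    else ret
  let ret := if ret.length = 0 then ret ++ ["3"] else ret
  PySem.Str.join "," ret

-- ===== PORT B =====
def hitF (c : Int) : Bool := decide (0 ≤ c ∧ c ≤ 207 ∧ PySem.Int.mod c 3 = 0)
def hitW (c : Int) : Bool := decide (0 ≤ c ∧ c ≤ 203 ∧ PySem.Int.mod c 7 = 0)
def hitG (c : Int) : Bool := decide (0 ≤ c ∧ c ≤ 205 ∧ PySem.Int.mod c 5 = 0)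

def judge_attribute_py_alt (bushu_codes : List Int) : String :=
  let hits := bushu_codes.foldl
    (fun (acc : Bool × Bool × Bool) c =>
      (acc.1 || hitF c, acc.2.1 || hitW c, acc.2.2 || hitG c))
    (false, false, false)
  let ret : List String :=
    (if hits.1 then ["1"] else []) ++ (if hits.2.1 then ["2"] else []) ++
    (if hits.2.2 then ["3"] else [])
  let ret := if ret.isEmpty then ["3"] else ret
  PySem.Str.join "," ret

-- ===== PRECONDITION & SPEC =====
def Spec_judge_attribute_py (bushu_codes : List Int) (out : String) : Prop := out = judge_attribute_py_alt bushu_codes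
instance (bushu_codes : List Int) (out : String) : Decidable (Spec_judge_attribute_py bushu_codes out) := by unfold Spec_judge_attribute_py; infer_instance

-- ===== CLAIM (what is proved, stated in full; the proofs are below) =====
def Claim_equal_judge_attribute_py : Prop := ∀ (bushu_codes : List Int), Dom_judge_attribute_py bushu_codes → Spec_judge_attribute_py bushu_codes (judge_attribute_py bushu_codes)

-- ===== LEMMAS AND PROOFS =====

theorem fold_hits (xs : List Int) (a b c : Bool) :
    xs.foldl (fun (acc : Bool × Bool × Bool) c =>
      (acc.1 || hitF c, acc.2.1 || hitW c, acc.2.2 || hitG c)) (a, b, c)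
    = (a || xs.any hitF, b || xs.any hitW, c || xs.any hitG) := by
  induction xs generalizing a b c with
  | nil => simp
  | cons x xs ih => simp [List.foldl, ih, Bool.or_assoc]

theorem inter_pos (ms xs : List Int) (p : Int → Bool)
    (hms : ∀ x, x ∈ ms ↔ p x = true) :
    (0 < ((PySem.Set.ofList ms).inter (PySem.Set.ofList xs)).length)
      ↔ xs.any p = true := by
  rw [List.length_pos_iff_exists_mem]
  simp only [PySem.Set.mem_inter, PySem.Set.mem_ofList, List.any_eq_true, hms]
  tauto

theorem memF (x : Int) : x ∈ (PySem.List.pyRange 0 70 1).map (fun i => i * 3) ↔ hitF x = true := by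
  simp only [List.mem_map, PySem.List.mem_pyRange_one, hitF, decide_eq_true_eq,
    PySem.Int.mod_eq_zero_iff_dvd]
  constructor
  · rintro ⟨i, ⟨h0, h1⟩, rfl⟩; refine ⟨by omega, by omega, ⟨i, by ring⟩⟩
  · rintro ⟨h0, h1, k, rfl⟩; exact ⟨k, ⟨by omega, by omega⟩, by ring⟩

theorem memW (x : Int) : x ∈ (PySem.List.pyRange 0 30 1).map (fun i => i * 7) ↔ hitW x = true := by
  simp only [List.mem_map, PySem.List.mem_pyRange_one, hitW, decide_eq_true_eq,
    PySem.Int.mod_eq_zero_iff_dvd]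
  constructor
  · rintro ⟨i, ⟨h0, h1⟩, rfl⟩; refine ⟨by omega, by omega, ⟨i, by ring⟩⟩
  · rintro ⟨h0, h1, k, rfl⟩; exact ⟨k, ⟨by omega, by omega⟩, by ring⟩

theorem memG (x : Int) : x ∈ (PySem.List.pyRange 0 42 1).map (fun i => i * 5) ↔ hitG x = true := by
  simp only [List.mem_map, PySem.List.mem_pyRange_one, hitG, decide_eq_true_eq,
    PySem.Int.mod_eq_zero_iff_dvd]
  constructor
  · rintro ⟨i, ⟨h0, h1⟩, rfl⟩; refine ⟨by omega, by omega, ⟨i, by ring⟩⟩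
  · rintro ⟨h0, h1, k, rfl⟩; exact ⟨k, ⟨by omega, by omega⟩, by ring⟩

-- ===== VERDICT (by name: the statement is the Claim_ definition above) =====
set_option maxRecDepth 8192 in
theorem judge_attribute_py_spec : Claim_equal_judge_attribute_py := by
  intro xs _
  unfold Spec_judge_attribute_py judge_attribute_py judge_attribute_py_alt
  simp only [fold_hits, Bool.false_or]
  rcases xs with _ | ⟨x, rest⟩
  · decide
  · have hf := inter_pos _ (x :: rest) hitF memF
    have hw := inter_pos _ (x :: rest) hitW memW
    have hg := inter_pos _ (x :: rest) hitG memG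
    have hlen : PySem.List.len (x :: rest) > 0 := by simp [PySem.List.len_eq]
    rw [if_pos hlen]
    simp only [PySem.Set.len_eq, gt_iff_lt, Int.natCast_pos]
    simp only [hf, hw, hg]
    cases hF : (x :: rest).any hitF <;> cases hW : (x :: rest).any hitW <;>
      cases hG : (x :: rest).any hitG <;> (try simp only [hF, hW, hG]) <;> decide
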